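-- pv_equiv track=rewrite | github.com/GSA-TTS/ai-gov-api | tests/integration/utils/security_validators.py | validate_security_headers
-- ===== SOURCE A (Python) =====
-- from typing import Dict, Any, List, Tuple, Optional, Union
--
-- def validate_security_headers(headers: Dict[str, str]) -> List[str]:
--     """Validate presence of security headers"""
--     required_headers = [
--         "X-Content-Type-Options",
--         "X-Frame-Options",
--         "X-XSS-Protection",
--         "Strict-Transport-Security",
--         "Content-Security-Policy"
--     ]
--
--     missing_headers = []
--     headers_lower = {k.lower(): v for k, v in headers.items()}
--
--     for header in required_headers:
--         if header.lower() not in headers_lower: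
--             missing_headers.append(header)
--
--     return missing_headers
-- ===== SOURCE B (Python) =====
-- def validate_security_headers(headers):
--     """Validate presence of security headers"""
--     missing = [
--         "X-Content-Type-Options",
--         "X-Frame-Options",
--         "X-XSS-Protection",
--         "Strict-Transport-Security",
--         "Content-Security-Policy",
--     ]
--     for k in headers:
--         kl = k.lower()
--         missing = [h for h in missing if h.lower() != kl]
--     return missing
-- ===== Notes on version B (the rewrite author's own statement) =====
-- stated objective: alternative
-- what changed: B inverts the traversal: instead of building a lowercased dict and filtering the required list by membership, it starts with all required headers as missing and makes one pass over the input header keys, each key deleting its case-insensitive match from the remaining list.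
import Mathlib
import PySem

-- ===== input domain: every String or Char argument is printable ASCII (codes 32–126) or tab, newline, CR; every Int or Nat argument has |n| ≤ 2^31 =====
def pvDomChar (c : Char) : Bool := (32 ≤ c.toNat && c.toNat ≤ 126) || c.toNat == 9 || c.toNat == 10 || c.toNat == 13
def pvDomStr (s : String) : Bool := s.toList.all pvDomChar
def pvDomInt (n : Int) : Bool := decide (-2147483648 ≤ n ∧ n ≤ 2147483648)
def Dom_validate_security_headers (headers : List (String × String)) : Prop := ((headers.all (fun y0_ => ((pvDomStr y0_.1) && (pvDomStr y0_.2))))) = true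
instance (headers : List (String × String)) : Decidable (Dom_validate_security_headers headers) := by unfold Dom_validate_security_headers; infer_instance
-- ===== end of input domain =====

-- B inverts the traversal: it starts with all required headers as missing and makes one
-- pass over the input keys, each key deleting its case-insensitive match (objective: alternative).

-- ===== PORT A =====
def validate_security_headers (headers : List (String × String)) : List String :=
  let required_headers : List String :=
    ["X-Content-Type-Options", "X-Frame-Options", "X-XSS-Protection",
     "Strict-Transport-Security", "Content-Security-Policy"]
  let missing_headers : List String := []
  let headers_lower : PySem.Dict String String :=
    headers.foldl (fun d p => d.insert (PySem.Str.lower p.1) p.2) PySem.Dict.empty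
  let missing_headers :=
    required_headers.foldl (fun acc header =>
      if headers_lower.contains (PySem.Str.lower header) = false then acc ++ [header] else acc)
      missing_headers
  missing_headers

-- ===== PORT B =====
def validate_security_headers_alt (headers : List (String × String)) : List String :=
  let missing : List String :=
    ["X-Content-Type-Options", "X-Frame-Options", "X-XSS-Protection",
     "Strict-Transport-Security", "Content-Security-Policy"]
  headers.foldl (fun missing p =>
    let kl := PySem.Str.lower p.1
    missing.filter (fun h => !(PySem.Str.lower h == kl))) missing

-- ===== PRECONDITION & SPEC =====
def Spec_validate_security_headers (headers : List (String × String)) (out : List String) : Prop := out = validate_security_headers_alt headers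
instance (headers : List (String × String)) (out : List String) : Decidable (Spec_validate_security_headers headers out) := by unfold Spec_validate_security_headers; infer_instance

-- ===== CLAIM (what is proved, stated in full; the proofs are below) =====
def Claim_equal_validate_security_headers : Prop := ∀ (headers : List (String × String)), Dom_validate_security_headers headers → Spec_validate_security_headers headers (validate_security_headers headers)

-- ===== LEMMAS AND PROOFS =====

-- the lowered-key dict's membership test equals a direct scan of the keys
theorem contains_foldl_insert_lower (headers : List (String × String))
    (d : PySem.Dict String String) (x : String) :
    (headers.foldl (fun d p => d.insert (PySem.Str.lower p.1) p.2) d).contains x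
      = (d.contains x || headers.any (fun p => PySem.Str.lower p.1 == x)) := by
  induction headers generalizing d with
  | nil => simp
  | cons p t ih =>
      simp only [List.foldl_cons, List.any_cons, ih, PySem.Dict.contains_insert,
        BEq.comm (b := x)]
      ac_rfl

-- B's successive per-key deletions amount to one filter by "no key matches"
theorem foldl_filter_eq_filter_all (headers : List (String × String)) (l : List String) :
    headers.foldl (fun missing p =>
        missing.filter (fun h => !(PySem.Str.lower h == PySem.Str.lower p.1))) l
      = l.filter (fun h => headers.all (fun p => !(PySem.Str.lower h == PySem.Str.lower p.1))) := by
  induction headers generalizing l with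
  | nil => simp
  | cons p t ih =>
      simp only [List.foldl_cons, ih, List.filter_filter, List.all_cons]
      congr 1
      funext h
      rw [Bool.and_comm]

theorem validate_security_headers_spec : Claim_equal_validate_security_headers := by
  intro headers _
  unfold Spec_validate_security_headers validate_security_headers validate_security_headers_alt
  simp only [PySem.List.foldl_append_ite_eq_filter, foldl_filter_eq_filter_all]
  simp only [contains_foldl_insert_lower, PySem.Dict.contains_empty, Bool.false_or]
  simp only [List.nil_append]
  apply List.filter_congr
  intro h _
  simp [BEq.comm, List.all_eq_not_any_not]
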